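-- pv_equiv track=rewrite | github.com/kiyoteruhosoda/FlaskApp | domain/wiki/markdown.py | apply
-- ===== SOURCE A (Python) =====
-- def apply(text: str) -> str:
--     if not text:
--         return ""
--
--     text = text.replace('\r\n', '\n').replace('\r', '\n')
--     lines = text.split('\n')
--     result_lines: list[str] = []
--     in_fenced_code = False
--
--     for idx, line in enumerate(lines):
--         if line.strip().startswith('```'):
--             in_fenced_code = not in_fenced_code
--             result_lines.append(line)
--             continue
--
--         if in_fenced_code:
--             result_lines.append(line)
--             continue
--
--         if (
--             idx + 1 < len(lines)
--             and line.strip()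
--             and lines[idx + 1].strip()
--             and not lines[idx + 1].startswith('#')
--             and not line.endswith('  ')
--         ):
--             result_lines.append(line + '  ')
--         else:
--             result_lines.append(line)
--
--     return '\n'.join(result_lines)
-- ===== SOURCE B (Python) =====
-- def apply(text: str) -> str:
--     if not text:
--         return ""
--
--     out = []
--     in_code = False
--     pending = None          # the previous line, waiting for its successor
--     pending_verbatim = False  # pending was a fence line or inside fenced code
--     for line in text.replace('\r\n', '\n').replace('\r', '\n').split('\n'):
--         if pending is not None:
--             if (not pending_verbatim
--                     and pending.strip()
--                     and line.strip()
--                     and not line.startswith('#')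
--                     and not pending.endswith('  ')):
--                 out.append(pending + '  ')
--             else:
--                 out.append(pending)
--         is_fence = line.strip().startswith('```')
--         pending_verbatim = is_fence or in_code
--         if is_fence:
--             in_code = not in_code
--         pending = line
--     out.append(pending)  # the last line never gains trailing spaces
--     return '\n'.join(out)
-- ===== Notes on version B (the rewrite author's own statement) =====
-- stated objective: alternative
-- what changed: Replaces A's indexed loop over enumerate(lines) with a lines[idx+1] lookahead by a single streaming pass that holds one pending line (plus its recorded verbatim flag) and decides the trailing-space emission when the next line arrives, flushing the last pending line after the loop.
import Mathlib
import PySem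

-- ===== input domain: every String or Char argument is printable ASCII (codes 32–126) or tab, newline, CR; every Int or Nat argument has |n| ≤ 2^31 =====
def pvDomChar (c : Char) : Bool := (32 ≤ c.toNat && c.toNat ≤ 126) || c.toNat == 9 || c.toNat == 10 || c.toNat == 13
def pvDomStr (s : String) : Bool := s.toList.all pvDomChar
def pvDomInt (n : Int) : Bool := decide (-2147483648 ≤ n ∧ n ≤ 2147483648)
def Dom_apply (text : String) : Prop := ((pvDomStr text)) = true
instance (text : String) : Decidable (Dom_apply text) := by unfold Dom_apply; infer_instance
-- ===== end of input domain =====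

-- B replaces A's indexed loop with a lookahead into lines[idx+1] by a streaming
-- single pass that holds one pending line (alternative decomposition, same cost).

-- ===== PORT A =====
-- the body of A's for-loop over enumerate(lines); `lines` is the whole list, for the lines[idx+1] lookahead
def applyStepA (lines : List String) (st : Bool × List String) (p : Int × String) : Bool × List String :=
  let fc := st.1
  let res := st.2
  let idx := p.1
  let line := p.2
  if PySem.Str.startswith (PySem.Str.strip line) "```" then
    (!fc, res ++ [line])
  else if fc then
    (fc, res ++ [line])
  else if (decide (idx + 1 < PySem.List.len lines)
           && !(PySem.Str.strip line == "")
           && (match PySem.List.pyGet? lines (idx + 1) with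
               | some nxt => !(PySem.Str.strip nxt == "")
               | none => false)
           && (match PySem.List.pyGet? lines (idx + 1) with
               | some nxt => !(PySem.Str.startswith nxt "#")
               | none => false)
           && !(PySem.Str.endswith line "  ")) then
    (fc, res ++ [line ++ "  "])
  else
    (fc, res ++ [line])

def apply (text : String) : String :=
  if text == "" then ""
  else
    let t := PySem.Str.replace (PySem.Str.replace text "\r\n" "\n") "\r" "\n"
    let lines := (PySem.Str.split? t "\n").getD []   -- sep "\n" ≠ "": split? is always `some` here
    let st := (PySem.List.enumerate lines 0).foldl (applyStepA lines) (false, [])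
    PySem.Str.join "\n" st.2

-- ===== PORT B =====
-- the body of B's for-loop; state = (in_code, pending, pending_verbatim, out)
def applyStepB (st : Bool × Option String × Bool × List String) (line : String) :
    Bool × Option String × Bool × List String :=
  match st with
  | (inCode, pending, pv, out) =>
  let out :=
    match pending with
    | none => out
    | some pnd =>
        if (!pv
            && !(PySem.Str.strip pnd == "")
            && !(PySem.Str.strip line == "")
            && !(PySem.Str.startswith line "#")
            && !(PySem.Str.endswith pnd "  ")) then
          out ++ [pnd ++ "  "]
        else
          out ++ [pnd]
  let isFence := PySem.Str.startswith (PySem.Str.strip line) "```"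
  let pv := isFence || inCode
  let inCode := if isFence then !inCode else inCode
  (inCode, some line, pv, out)

def apply_alt (text : String) : String :=
  if text == "" then ""
  else
    let lines := (PySem.Str.split? (PySem.Str.replace (PySem.Str.replace text "\r\n" "\n") "\r" "\n") "\n").getD []
    let st := lines.foldl applyStepB (false, none, false, [])
    let out := match st.2.1 with   -- out.append(pending); pending is never None since `lines` is nonempty
               | some p => st.2.2.2 ++ [p]
               | none => st.2.2.2
    PySem.Str.join "\n" out

-- ===== PRECONDITION & SPEC =====
def Spec_apply (text : String) (out : String) : Prop := out = apply_alt text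
instance (text : String) (out : String) : Decidable (Spec_apply text out) := by unfold Spec_apply; infer_instance

-- ===== CLAIM (what is proved, stated in full; the proofs are below) =====
def Claim_equal_apply : Prop := ∀ (text : String), Dom_apply text → Spec_apply text (apply text)

-- ===== LEMMAS AND PROOFS =====

-- proof-side vocabulary: per-line facts and the common reference run
def pvFence (l : String) : Bool := PySem.Str.startswith (PySem.Str.strip l) "```"

def pvNextFc (fc : Bool) (l : String) : Bool := if pvFence l then !fc else fc

-- what one line becomes, given that `verb` says "fence line or inside fenced code" and next? is its successor
def pvEmit (verb : Bool) (l : String) (next? : Option String) : String :=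
  match next? with
  | none => l
  | some n =>
      if (!verb
          && !(PySem.Str.strip l == "")
          && !(PySem.Str.strip n == "")
          && !(PySem.Str.startswith n "#")
          && !(PySem.Str.endswith l "  ")) then
        l ++ "  "
      else
        l

def pvRun (fc : Bool) : List String → List String
  | [] => []
  | l :: rest => pvEmit (pvFence l || fc) l rest.head? :: pvRun (pvNextFc fc l) rest

-- A's step on the element at index pre.length of pre ++ l :: rest produces pvEmit
theorem stepA_emit (pre rest : List String) (l : String) (fc : Bool) (res : List String) :
    applyStepA (pre ++ l :: rest) (fc, res) ((pre.length : Int), l)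
      = (pvNextFc fc l, res ++ [pvEmit (pvFence l || fc) l rest.head?]) := by
  cases rest with
  | nil =>
      cases hf : pvFence l <;> cases fc <;>
        simp [applyStepA, pvEmit, pvNextFc, pvFence] at hf ⊢ <;> simp [hf]
  | cons r rs =>
      have hlen : ((pre.length : Int) + 1 < PySem.List.len (pre ++ l :: r :: rs)) := by
        simp [PySem.List.len_eq]
      have hget : PySem.List.pyGet? (pre ++ l :: r :: rs) ((pre.length : Int) + 1) = some r := by
        have := PySem.List.pyGet?_append_right (pre := pre ++ [l]) (ys := r :: rs) (k := 0)
        simpa using this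
      cases hf : pvFence l <;> cases fc <;>
        simp [applyStepA, pvEmit, pvNextFc, pvFence] at hf ⊢ <;>
        (simp [hf, hget]; (try (split_ifs <;> simp)))

-- A's fold over the enumerated suffix is pvRun
theorem foldA_eq_pvRun (suf : List String) : ∀ (pre : List String) (fc : Bool) (res : List String),
    ((PySem.List.enumerate suf (pre.length : Int)).foldl (applyStepA (pre ++ suf)) (fc, res)).2
      = res ++ pvRun fc suf := by
  induction suf with
  | nil => intro pre fc res; simp [PySem.List.enumerate, pvRun]
  | cons l rest ih =>
      intro pre fc res
      rw [PySem.List.enumerate_cons, List.foldl_cons, stepA_emit]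
      have hcast : (pre.length : Int) + 1 = ((pre ++ [l]).length : Int) := by
        simp
      have happ : pre ++ l :: rest = (pre ++ [l]) ++ rest := by simp
      rw [hcast, happ, ih (pre ++ [l]) (pvNextFc fc l) (res ++ [pvEmit (pvFence l || fc) l rest.head?])]
      simp [pvRun]

-- B's fold, holding pending p whose facts came from state fc, flushes to pvRun
theorem foldB_eq_pvRun (suf : List String) : ∀ (fc : Bool) (p : String) (out : List String),
    (match (suf.foldl applyStepB (pvNextFc fc p, some p, pvFence p || fc, out)).2.1 with
     | some q => (suf.foldl applyStepB (pvNextFc fc p, some p, pvFence p || fc, out)).2.2.2 ++ [q]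
     | none => (suf.foldl applyStepB (pvNextFc fc p, some p, pvFence p || fc, out)).2.2.2)
      = out ++ pvRun fc (p :: suf) := by
  induction suf with
  | nil =>
      intro fc p out
      simp [pvRun, pvEmit]
  | cons l rest ih =>
      intro fc p out
      rw [List.foldl_cons]
      have hstep : applyStepB (pvNextFc fc p, some p, pvFence p || fc, out) l
          = (pvNextFc (pvNextFc fc p) l, some l, pvFence l || pvNextFc fc p,
             out ++ [pvEmit (pvFence p || fc) p (some l)]) := by
        simp only [applyStepB, pvEmit, pvNextFc, pvFence]
        split <;> (simp; (try (split <;> rfl)))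
      rw [hstep, ih (pvNextFc fc p) l (out ++ [pvEmit (pvFence p || fc) p (some l)])]
      simp [pvRun]

-- ===== VERDICT (by name: the statement is the Claim_ definition above) =====
theorem apply_spec : Claim_equal_apply := by
  intro text _
  unfold Spec_apply apply apply_alt
  by_cases h : text == ""
  · simp [h]
  · simp only [h, if_false, Bool.false_eq_true]
    generalize ((PySem.Str.split? (PySem.Str.replace (PySem.Str.replace text "\r\n" "\n") "\r" "\n") "\n").getD []) = lines
    cases lines with
    | nil => simp [PySem.List.enumerate]
    | cons l0 rest =>
        congr 1
        have hA := foldA_eq_pvRun (l0 :: rest) [] false []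
        simp only [List.nil_append, List.length_nil, Int.natCast_zero] at hA
        rw [hA]
        rw [List.foldl_cons]
        have h0 : applyStepB (false, none, false, []) l0
            = (pvNextFc false l0, some l0, pvFence l0 || false, []) := by
          simp only [applyStepB, pvNextFc, pvFence]
          rfl
        rw [h0]
        have hB := foldB_eq_pvRun rest false l0 []
        rw [hB]
        simp
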